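-- pv_equiv track=rewrite | github.com/jesseliu0913/dg_tunning | tune_umls_dialogue.py | preprocess_conversation
-- ===== SOURCE A (Python) =====
-- def preprocess_conversation(conversation):
--     input_texts = []
--     output_texts = []
--     for i in range(len(conversation)):
--         line = conversation[i].strip()
--         if line:
--             if line.startswith("Doctor:"):
--                 if i == 0 or conversation[i - 1].strip().startswith("Doctor:"):
--                     continue
--                 else:
--                     input_text = ' '.join(conversation[:i]).strip()
--                     output_text = line[len("Doctor:"):].strip()
--                     input_texts.append(input_text)
--                     output_texts.append(output_text)
--     return input_texts, output_texts
-- ===== SOURCE B (Python) =====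
-- def preprocess_conversation(conversation):
--     # One pass keeping an incremental prefix accumulator (and the previous line) instead of re-joining conversation[:i] at each qualifying line.
--     input_texts = []
--     output_texts = []
--     acc = ""
--     prev = None
--     for raw in conversation:
--         line = raw.strip()
--         if line.startswith("Doctor:") and prev is not None and not prev.strip().startswith("Doctor:"):
--             input_texts.append(acc.strip())
--             output_texts.append(line[len("Doctor:"):].strip())
--         if prev is None:
--             acc = raw
--         else:
--             acc += " " + raw
--         prev = raw
--     return input_texts, output_texts
-- ===== Notes on version B (the rewrite author's own statement) =====
-- stated objective: alternative
-- what changed: Instead of an index loop that recomputes ' '.join(conversation[:i]) at every qualifying Doctor line, B walks the list once keeping a running accumulator equal to the joined prefix and the previous raw line, appending to the accumulator in place each step.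
import Mathlib
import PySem

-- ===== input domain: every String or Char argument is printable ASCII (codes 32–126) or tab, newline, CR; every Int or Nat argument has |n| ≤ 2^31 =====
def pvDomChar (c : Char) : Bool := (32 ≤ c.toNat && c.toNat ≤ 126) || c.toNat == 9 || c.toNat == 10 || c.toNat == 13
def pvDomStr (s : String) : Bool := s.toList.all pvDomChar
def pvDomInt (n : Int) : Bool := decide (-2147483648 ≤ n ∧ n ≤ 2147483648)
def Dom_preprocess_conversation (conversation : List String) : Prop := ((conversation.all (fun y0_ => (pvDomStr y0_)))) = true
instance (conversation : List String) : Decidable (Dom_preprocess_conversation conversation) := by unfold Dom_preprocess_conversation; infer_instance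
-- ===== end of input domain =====

-- B replaces A's per-index re-join of conversation[:i] by a single pass that keeps an
-- incremental prefix accumulator and the previous line (objective: alternative decomposition).
-- ===== PORT A =====
-- helper: one iteration of A's index loop (i = loop variable of 'for i in range(len(conversation))')
def pvStepA (conversation : List String) (st : List String × List String) (i : Nat) :
    List String × List String :=
  let line := PySem.Str.strip (conversation.getD i "")
  if line = "" then st
  else if PySem.Str.startswith line "Doctor:" then
    if i = 0 ∨ PySem.Str.startswith (PySem.Str.strip (conversation.getD (i - 1) "")) "Doctor:" then
      st
    else
      let input_text := PySem.Str.strip (PySem.Str.join " " (PySem.List.slice conversation none (some (i : Int))))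
      let output_text := PySem.Str.strip (PySem.Str.slice line (some 7) none)
      (st.1 ++ [input_text], st.2 ++ [output_text])
  else st

def preprocess_conversation (conversation : List String) : List String × List String :=
  (List.range conversation.length).foldl (pvStepA conversation) ([], [])

-- ===== PORT B =====
-- helper: one iteration of B's single pass; state = (acc, prev, input_texts, output_texts)
def pvStepB (st : String × Option String × List String × List String) (raw : String) :
    String × Option String × List String × List String :=
  let acc := st.1
  let prev := st.2.1
  let ins := st.2.2.1
  let outs := st.2.2.2
  let line := PySem.Str.strip raw
  let hit := PySem.Str.startswith line "Doctor:" &&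
    (match prev with
     | none => false
     | some p => !(PySem.Str.startswith (PySem.Str.strip p) "Doctor:"))
  let ins' := if hit then ins ++ [PySem.Str.strip acc] else ins
  let outs' := if hit then outs ++ [PySem.Str.strip (PySem.Str.slice line (some 7) none)] else outs
  let acc' := match prev with
    | none => raw
    | some _ => acc ++ " " ++ raw
  (acc', some raw, ins', outs')

def preprocess_conversation_alt (conversation : List String) : List String × List String :=
  let st := conversation.foldl pvStepB ("", none, [], [])
  (st.2.2.1, st.2.2.2)

-- ===== PRECONDITION & SPEC =====
def Spec_preprocess_conversation (conversation : List String) (out : List String × List String) : Prop := out = preprocess_conversation_alt conversation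
instance (conversation : List String) (out : List String × List String) : Decidable (Spec_preprocess_conversation conversation out) := by unfold Spec_preprocess_conversation; infer_instance

-- ===== CLAIM (what is proved, stated in full; the proofs are below) =====
def Claim_equal_preprocess_conversation : Prop := ∀ (conversation : List String), Dom_preprocess_conversation conversation → Spec_preprocess_conversation conversation (preprocess_conversation conversation)

-- ===== LEMMAS AND PROOFS =====
theorem pvCharsJoin_append (sep : List Char) (l : List (List Char)) (a : List Char)
    (h : l ≠ []) :
    PySem.Chars.join sep (l ++ [a]) = PySem.Chars.join sep l ++ sep ++ a := by
  induction l with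
  | nil => simp at h
  | cons p rest ih =>
    cases rest with
    | nil => simp [PySem.Chars.join_cons_cons, PySem.Chars.join_singleton]
    | cons q rs =>
      have ih' := ih (by simp)
      simp only [List.cons_append] at ih' ⊢
      rw [PySem.Chars.join_cons_cons sep p q (rs ++ [a]),
        PySem.Chars.join_cons_cons sep p q rs, ih']
      simp [List.append_assoc]

theorem pvJoin_append (ys : List String) (x : String) (h : ys ≠ []) :
    PySem.Str.join " " (ys ++ [x]) = PySem.Str.join " " ys ++ " " ++ x := by
  rw [← String.toList_inj]
  simp only [PySem.Str.toList_join, List.map_append, List.map_cons, List.map_nil,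
    String.toList_append]
  exact pvCharsJoin_append _ _ _ (by simp [h])

theorem pvGetD_append_lt (l : List String) (x : String) (n : Nat) (h : n < l.length) :
    (l ++ [x]).getD n "" = l.getD n "" := by
  simp [List.getD, List.getElem?_append_left h]

theorem pvGetD_append_len (l : List String) (x : String) :
    (l ++ [x]).getD l.length "" = x := by
  simp [List.getD]

theorem pvGetLast?_eq (l : List String) (h : l ≠ []) :
    l.getLast? = some (l.getD (l.length - 1) "") := by
  rw [List.getLast?_eq_getElem?]
  cases l with
  | nil => simp at h
  | cons a t => simp [List.getD]

theorem pvStepA_append (xs : List String) (x : String) (st : List String × List String)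
    (i : Nat) (h : i < xs.length) :
    pvStepA (xs ++ [x]) st i = pvStepA xs st i := by
  unfold pvStepA
  rw [pvGetD_append_lt xs x i h, pvGetD_append_lt xs x (i - 1) (by omega),
    PySem.List.slice_to_natCast, PySem.List.slice_to_natCast,
    List.take_append_of_le_length (by omega)]

theorem pvA_concat (xs : List String) (x : String) :
    preprocess_conversation (xs ++ [x]) =
      pvStepA (xs ++ [x]) (preprocess_conversation xs) xs.length := by
  unfold preprocess_conversation
  rw [List.length_append, List.length_cons, List.length_nil, List.range_succ,
    List.foldl_append, List.foldl_cons, List.foldl_nil]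
  congr 1
  apply PySem.List.foldl_congr_mem
  intro st i hi
  exact pvStepA_append xs x st i (List.mem_range.mp hi)

theorem pvStateB (c : List String) :
    c.foldl pvStepB ("", none, ([], [])) =
      (PySem.Str.join " " c, c.getLast?, preprocess_conversation c) := by
  induction c using List.reverseRecOn with
  | nil => rfl
  | append_singleton xs x ih =>
    rw [List.foldl_append, List.foldl_cons, List.foldl_nil, ih, pvA_concat,
      List.getLast?_concat]
    rcases List.eq_nil_or_concat xs with rfl | ⟨ys, y, rfl⟩
    · simp only [pvStepB, pvStepA, preprocess_conversation, List.length_nil, List.range_zero,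
        List.foldl_nil, List.getLast?_nil]
      simp [PySem.Str.join]
    · rw [List.concat_eq_append]
      have hne : ys ++ [y] ≠ [] := by simp
      have hlen : (ys ++ [y]).length - 1 = ys.length := by simp
      unfold pvStepB pvStepA
      rw [pvGetD_append_len, pvGetLast?_eq (ys ++ [y]) hne,
        pvGetD_append_lt (ys ++ [y]) x ((ys ++ [y]).length - 1) (by simp),
        PySem.List.slice_to_natCast, List.take_append_of_le_length (by simp),
        List.take_length, pvJoin_append (ys ++ [y]) x hne]
      by_cases h2 : PySem.Str.strip x = ""
      · rw [h2]
        simp [PySem.Chars.startswith]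
      · by_cases h1 :
          PySem.Chars.startswith (PySem.Chars.strip x.toList) ['D', 'o', 'c', 't', 'o', 'r', ':'] = true
        · by_cases h3 :
            PySem.Chars.startswith (PySem.Chars.strip y.toList) ['D', 'o', 'c', 't', 'o', 'r', ':'] = true
          · simp [h1, h2, h3]
          · simp [h1, h2, h3]
        · simp [h1, h2]

-- ===== VERDICT (by name: the statement is the Claim_ definition above) =====
theorem preprocess_conversation_spec : Claim_equal_preprocess_conversation := by
  intro conversation _
  unfold Spec_preprocess_conversation preprocess_conversation_alt
  rw [pvStateB]
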